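-- pv_equiv track=rewrite | github.com/yeemh/wish9 | mh/5주차_모음사전.py | solution
-- ===== SOURCE A (Python) =====
-- def solution(word):
--     answer = 0
--     word_dic = {"E": 1, "I": 2, "O": 3, "U": 4}
--     for i, w in enumerate(word):
--         if w == "A":
--             answer += 1
--         else:
--             for j in range(5 - i):
--                 answer += (5 ** j) * word_dic[w]
--             answer += 1
--     return answer
-- ===== SOURCE B (Python) =====
-- def solution(word):
--     coef = [781, 156, 31, 6, 1]
--     vals = {"A": 0, "E": 1, "I": 2, "O": 3, "U": 4}
--     ans = 0
--     for i, w in enumerate(word):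
--         if i < 5:
--             ans += vals[w] * coef[i] + 1
--         else:
--             ans += 1
--     return ans
-- ===== Notes on version B (the rewrite author's own statement) =====
-- stated objective: simpler
-- what changed: Replaces A's inner geometric-sum loop (5**j accumulation) by a single multiply-add with precomputed coefficients (5^(5-i)-1)/4 per position.
import Mathlib
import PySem

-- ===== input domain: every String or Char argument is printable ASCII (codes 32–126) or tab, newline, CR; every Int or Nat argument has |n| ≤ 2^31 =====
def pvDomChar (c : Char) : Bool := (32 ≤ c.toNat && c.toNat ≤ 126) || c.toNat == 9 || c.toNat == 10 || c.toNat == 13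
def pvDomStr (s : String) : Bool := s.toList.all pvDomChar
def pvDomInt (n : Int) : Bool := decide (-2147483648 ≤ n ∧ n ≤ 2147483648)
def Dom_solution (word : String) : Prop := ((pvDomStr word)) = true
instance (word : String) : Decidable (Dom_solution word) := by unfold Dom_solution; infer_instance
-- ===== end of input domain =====

-- B replaces A's inner geometric-sum loop by one multiply-add with precomputed coefficients (simpler).
-- ===== PORT A =====
def wordDic : PySem.Dict Char Int :=
  PySem.Dict.ofList [('E', 1), ('I', 2), ('O', 3), ('U', 4)]

def solution (word : String) : Int :=
  (PySem.List.enumerate word.toList 0).foldl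
    (fun answer iw =>
      if iw.2 = 'A' then answer + 1
      else
        ((PySem.List.pyRange 0 (5 - iw.1) 1).foldl
          (fun a j => a + 5 ^ j.toNat * (wordDic.getD iw.2 0)) answer) + 1)
    0

-- ===== PORT B =====
def coefB : List Int := [781, 156, 31, 6, 1]
def valsB : PySem.Dict Char Int :=
  PySem.Dict.ofList [('A', 0), ('E', 1), ('I', 2), ('O', 3), ('U', 4)]

def solution_alt (word : String) : Int :=
  (PySem.List.enumerate word.toList 0).foldl
    (fun ans iw =>
      if iw.1 < 5 then ans + (valsB.getD iw.2 0) * PySem.List.pyGetD coefB iw.1 0 + 1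
      else ans + 1)
    0

-- ===== PRECONDITION & SPEC =====
-- Pre_ excludes exactly the inputs on which A raises KeyError: a character among the
-- first five that is not an uppercase vowel (A's dict lookup fails there).
def Pre_solution (word : String) : Prop :=
  ((word.toList.take 5).all (fun c => c == 'A' || c == 'E' || c == 'I' || c == 'O' || c == 'U')) = true
instance (word : String) : Decidable (Pre_solution word) := by unfold Pre_solution; infer_instance

def pvWitness_solution : String := "EIOUA"

def Spec_solution (word : String) (out : Int) : Prop := out = solution_alt word
instance (word : String) (out : Int) : Decidable (Spec_solution word out) := by unfold Spec_solution; infer_instance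

-- ===== CLAIM (what is proved, stated in full; the proofs are below) =====
def Claim_equal_solution : Prop :=
  ∀ (word : String), Dom_solution word → Pre_solution word → Spec_solution word (solution word)

-- ===== LEMMAS AND PROOFS =====

-- per-element agreement of the two fold steps, given the vowel condition at positions < 5
theorem step_agree (l : List Char) (hp : ∀ c ∈ l.take 5, c = 'A' ∨ c = 'E' ∨ c = 'I' ∨ c = 'O' ∨ c = 'U')
    (acc : Int) (p : Int × Char) (hm : p ∈ PySem.List.enumerate l 0) :
    (if p.2 = 'A' then acc + 1
      else ((PySem.List.pyRange 0 (5 - p.1) 1).foldl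
          (fun a j => a + 5 ^ j.toNat * (wordDic.getD p.2 0)) acc) + 1)
    = (if p.1 < 5 then acc + (valsB.getD p.2 0) * PySem.List.pyGetD coefB p.1 0 + 1
       else acc + 1) := by
  rw [PySem.List.mem_enumerate_iff] at hm
  obtain ⟨k, hk, rfl⟩ := hm
  simp only [zero_add]
  by_cases h5 : k < 5
  · have hv : l[k] = 'A' ∨ l[k] = 'E' ∨ l[k] = 'I' ∨ l[k] = 'O' ∨ l[k] = 'U' := by
      apply hp
      rw [List.mem_take_iff_getElem]
      exact ⟨k, by omega, rfl⟩
    interval_cases k <;>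
      rcases hv with h | h | h | h | h <;>
      simp [h, coefB, PySem.List.pyGetD,
        show PySem.List.pyRange 0 5 1 = [0,1,2,3,4] from by decide,
        show PySem.List.pyRange 0 4 1 = [0,1,2,3] from by decide,
        show PySem.List.pyRange 0 3 1 = [0,1,2] from by decide,
        show PySem.List.pyRange 0 2 1 = [0,1] from by decide,
        show PySem.List.pyRange 0 1 1 = [0] from by decide,
        show wordDic.getD 'E' 0 = 1 from by decide,
        show wordDic.getD 'I' 0 = 2 from by decide,
        show wordDic.getD 'O' 0 = 3 from by decide,
        show wordDic.getD 'U' 0 = 4 from by decide,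
        show valsB.getD 'A' 0 = 0 from by decide,
        show valsB.getD 'E' 0 = 1 from by decide,
        show valsB.getD 'I' 0 = 2 from by decide,
        show valsB.getD 'O' 0 = 3 from by decide,
        show valsB.getD 'U' 0 = 4 from by decide,
        List.foldl] <;> omega
  · have hk5 : ¬ ((k : Int) < 5) := by exact_mod_cast h5
    have hnil : PySem.List.pyRange 0 (5 - (k : Int)) 1 = [] :=
      PySem.List.pyRange_one_eq_nil (by omega)
    by_cases hA : l[k] = 'A' <;> simp [hA, hk5, hnil]

-- ===== VERDICT (by name: the statement is the Claim_ definition above) =====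
theorem solution_spec : Claim_equal_solution := by
  intro word _ hpre
  unfold Pre_solution at hpre
  rw [List.all_eq_true] at hpre
  unfold Spec_solution solution solution_alt
  refine PySem.List.foldl_congr_mem _ _ _ _
    (fun acc p hm => step_agree word.toList (fun c hc => ?_) acc p hm)
  have := hpre c hc
  simp only [Bool.or_eq_true, beq_iff_eq] at this
  tauto
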